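-- pv_equiv track=rewrite | github.com/dcparry/pythonProject | Heatmap_project_Dianne_Parry.py | classified_suburbs
-- ===== SOURCE A (Python) =====
-- def classified_suburbs(dogs):
--     """ Takes dictionary of alive dogs and returns new dictionary of suburb as
--         key and number of classified dogs in that suburb as the value.
--         :param dogs: dictionary of alive dogs and their attributes.
--         :return: dictionary of suburb and count as key/value pair.
--     """
--     classified_suburbs_dict = {}
--     for suburb, desexed, classification, microchip in dogs.values():
--         if suburb not in classified_suburbs_dict:
--             classified_suburbs_dict[suburb] = 0
--         if classification != "Not Applicable":
--             classified_suburbs_dict[suburb] += 1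
--     classified_dict = dict(sorted(classified_suburbs_dict.items()))
--     return classified_dict
-- ===== SOURCE B (Python) =====
-- def classified_suburbs(dogs):
--     """ Takes dictionary of alive dogs and returns new dictionary of suburb as
--         key and number of classified dogs in that suburb as the value.
--     """
--     rows = list(dogs.values())
--     return {s: sum(1 for r in rows if r[0] == s and r[2] != "Not Applicable")
--             for s in sorted({r[0] for r in rows})}
-- ===== Notes on version B (the rewrite author's own statement) =====
-- stated objective: simpler
-- what changed: Replaces A's incremental counting dict (zero-init branch + increment per row, then sort the items) by first building the sorted set of distinct suburbs and then counting the classified rows of each suburb with a generator comprehension; no mutable counter dict at all.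
import Mathlib
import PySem

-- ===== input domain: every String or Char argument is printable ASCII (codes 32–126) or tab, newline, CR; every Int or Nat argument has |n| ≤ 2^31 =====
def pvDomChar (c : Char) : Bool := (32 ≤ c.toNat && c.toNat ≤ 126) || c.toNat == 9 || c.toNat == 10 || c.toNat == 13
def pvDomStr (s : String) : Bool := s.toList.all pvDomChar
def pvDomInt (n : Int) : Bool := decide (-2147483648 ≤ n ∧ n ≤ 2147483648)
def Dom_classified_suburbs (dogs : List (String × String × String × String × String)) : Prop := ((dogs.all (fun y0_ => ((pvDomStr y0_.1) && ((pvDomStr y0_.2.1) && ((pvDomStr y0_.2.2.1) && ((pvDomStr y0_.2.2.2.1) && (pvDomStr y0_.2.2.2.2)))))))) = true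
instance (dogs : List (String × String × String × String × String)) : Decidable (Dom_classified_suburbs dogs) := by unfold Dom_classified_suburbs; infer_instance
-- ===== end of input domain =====

-- B replaces A's incremental counting dict (zero-init + increment, then sort the items) by a
-- sorted distinct-suburb list with a per-suburb count; simpler, same return value.


-- ===== PORT A =====
-- one loop iteration of A: zero-init a fresh suburb, then increment when classified
-- ('classified_suburbs_dict[suburb] += 1' is modify with default 0: the key is present there,
-- so the default is never used and the entry keeps its position, exactly as in Python)
def pvStepA (d : PySem.Dict String Int) (r : String × String × String × String) : PySem.Dict String Int :=
  let d1 := if d.contains r.1 then d else d.insert r.1 0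
  if r.2.2.1 ≠ "Not Applicable" then d1.modify r.1 0 (· + 1) else d1

def classified_suburbs (dogs : List (String × String × String × String × String)) : List (String × Int) :=
  let d := PySem.Dict.ofList dogs            -- the input dict, insertion order, later keys overwrite in place
  let acc := d.values.foldl pvStepA PySem.Dict.empty
  (PySem.List.sorted2 acc.items (fun p => p.1) (fun p => p.2)).map (fun p => p)  -- dict(sorted(items)): tuple sort
-- (the final .map is dict(...) rebuilding the pairs; keys are already distinct)

-- ===== PORT B =====
def classified_suburbs_alt (dogs : List (String × String × String × String × String)) : List (String × Int) :=
  let rows := (PySem.Dict.ofList dogs).values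
  (PySem.List.sorted (PySem.Set.ofList (rows.map (·.1))) (fun s => s)).map
    (fun s => (s, ((rows.filter (fun r => r.1 == s && r.2.2.1 != "Not Applicable")).length : Int)))

-- ===== PRECONDITION & SPEC =====
def Spec_classified_suburbs (dogs : List (String × String × String × String × String)) (out : List (String × Int)) : Prop := out = classified_suburbs_alt dogs
instance (dogs : List (String × String × String × String × String)) (out : List (String × Int)) : Decidable (Spec_classified_suburbs dogs out) := by unfold Spec_classified_suburbs; infer_instance

-- ===== CLAIM (what is proved, stated in full; the proofs are below) =====
def Claim_equal_classified_suburbs : Prop := ∀ (dogs : List (String × String × String × String × String)), Dom_classified_suburbs dogs → Spec_classified_suburbs dogs (classified_suburbs dogs)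



-- ===== LEMMAS AND PROOFS =====

-- the classification test A and B share
def pvCls (s : String) (r : String × String × String × String) : Bool :=
  r.1 == s && r.2.2.1 != "Not Applicable"

-- one step of A's loop: keys grow by Set.add
theorem pvStepA_keys (d : PySem.Dict String Int) (r : String × String × String × String) :
    (pvStepA d r).keys = PySem.Set.add d.keys r.1 := by
  unfold pvStepA
  by_cases hc : d.contains r.1 = true
  · have hm : r.1 ∈ d.keys := (PySem.Dict.contains_iff_mem_keys d r.1).mp hc
    by_cases hcl : r.2.2.1 = "Not Applicable" <;>
      simp [hc, hcl, PySem.Dict.keys_modify, PySem.Dict.keys_insert_of_contains,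
        PySem.Set.add, PySem.Set.contains, hm]
  · have hc' : d.contains r.1 = false := by simpa using hc
    have hm : r.1 ∉ d.keys := fun h => hc ((PySem.Dict.contains_iff_mem_keys d r.1).mpr h)
    by_cases hcl : r.2.2.1 = "Not Applicable" <;>
      simp [hc', hcl, PySem.Dict.keys_modify, PySem.Dict.insert_insert_self,
        PySem.Dict.keys_insert_of_not_contains, PySem.Set.add, PySem.Set.contains, hm]

theorem pvStepA_nodup (d : PySem.Dict String Int) (r : String × String × String × String)
    (h : d.keys.Nodup) : (pvStepA d r).keys.Nodup := by
  rw [pvStepA_keys]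
  unfold PySem.Set.add
  by_cases hm : PySem.Set.contains d.keys r.1 = true
  · have hm' : r.1 ∈ d.keys := by simpa [PySem.Set.contains] using hm
    simp [hm', h]
  · have hm' : r.1 ∉ d.keys := by simpa [PySem.Set.contains] using hm
    have hm2 : PySem.Set.contains d.keys r.1 = false := by simpa using hm
    simp only [hm2, Bool.false_eq_true, if_false]
    rw [List.nodup_append]
    refine ⟨h, List.nodup_singleton _, ?_⟩
    intro a ha b hb
    simp only [List.mem_singleton] at hb
    exact fun he => hm' ((hb ▸ he) ▸ ha)

theorem pvStepA_getD (d : PySem.Dict String Int) (r : String × String × String × String) (s : String) :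
    (pvStepA d r).getD s 0 = d.getD s 0 + (if pvCls s r then 1 else 0) := by
  unfold pvStepA pvCls
  by_cases hs : r.1 = s
  · subst hs
    by_cases hc : d.contains r.1 = true
    · by_cases hcl : r.2.2.1 = "Not Applicable" <;>
        simp [hc, hcl, PySem.Dict.getD_modify_self]
    · have hc' : d.contains r.1 = false := by simpa using hc
      have h0 : d.getD r.1 0 = 0 := by simp [PySem.Dict.getD_of_not_contains, hc']
      by_cases hcl : r.2.2.1 = "Not Applicable" <;>
        simp [hc', hcl, PySem.Dict.getD_modify_self, PySem.Dict.getD_insert_self, h0]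
  · by_cases hc : d.contains r.1 = true <;>
      by_cases hcl : r.2.2.1 = "Not Applicable" <;>
        simp [hc, hcl, hs, Ne.symm hs, PySem.Dict.getD_modify_of_ne, PySem.Dict.getD_insert_of_ne]

-- keys of A's counting loop: the distinct suburbs in first-appearance order
theorem pvKeysA (vals : List (String × String × String × String)) (d : PySem.Dict String Int) :
    (vals.foldl pvStepA d).keys = PySem.Set.update d.keys (vals.map (·.1)) := by
  induction vals generalizing d with
  | nil => simp [PySem.Set.update]
  | cons r vs ih =>
    rw [List.foldl_cons, ih, List.map_cons]
    unfold PySem.Set.update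
    rw [List.foldl_cons, pvStepA_keys]

theorem pvNodupA (vals : List (String × String × String × String)) (d : PySem.Dict String Int)
    (h : d.keys.Nodup) : (vals.foldl pvStepA d).keys.Nodup := by
  induction vals generalizing d with
  | nil => simpa using h
  | cons r vs ih => exact ih _ (pvStepA_nodup d r h)

-- values of A's counting loop: the classified count per suburb
theorem pvGetDA (vals : List (String × String × String × String)) (d : PySem.Dict String Int) (s : String) :
    (vals.foldl pvStepA d).getD s 0 = d.getD s 0 + (vals.countP (pvCls s) : Int) := by
  induction vals generalizing d with
  | nil => simp
  | cons r vs ih =>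
    rw [List.foldl_cons, ih, pvStepA_getD, List.countP_cons]
    by_cases hcl : pvCls s r <;> simp [hcl] <;> ring

-- insertBy only compares the inserted element with list members
theorem pvInsertByCongr {a : Type} (b1 b2 : a -> a -> Bool) (x : a) (ys : List a)
    (h : forall c, c ∈ ys -> b1 x c = b2 x c) :
    PySem.List.insertBy b1 x ys = PySem.List.insertBy b2 x ys := by
  induction ys with
  | nil => rfl
  | cons y ys ih =>
    have hxy := h y (by simp)
    by_cases hb : b1 x y = true
    · simp [PySem.List.insertBy, hb, hxy ▸ hb]
    · have hb2 : b2 x y = false := by rw [← hxy]; simpa using hb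
      simp [PySem.List.insertBy, hb, hb2]
      exact ih (fun c hc => h c (by simp [hc]))

-- two insertion sorts whose comparators agree on pairs from S coincide
theorem pvFoldlInsertByCongr {a : Type} (b1 b2 : a -> a -> Bool) (xs acc : List a) (S : List a)
    (hacc : forall z, z ∈ acc -> z ∈ S) (hxs : forall z, z ∈ xs -> z ∈ S)
    (h : forall z, z ∈ S -> forall c, c ∈ S -> b1 z c = b2 z c) :
    xs.foldl (fun acc x => PySem.List.insertBy b1 x acc) acc
      = xs.foldl (fun acc x => PySem.List.insertBy b2 x acc) acc := by
  induction xs generalizing acc with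
  | nil => rfl
  | cons x xs ih =>
    have hx : x ∈ S := hxs x (by simp)
    rw [List.foldl_cons, List.foldl_cons,
      pvInsertByCongr b1 b2 x acc (fun c hc => h x hx c (hacc c hc))]
    refine ih _ (fun z hz => ?_) (fun z hz => hxs z (by simp [hz]))
    have hz' : z = x ∨ z ∈ acc := by simpa [PySem.List.mem_insertBy] using hz
    rcases hz' with h1 | h2
    · exact h1 ▸ hx
    · exact hacc z h2

-- Python's tuple sort of distinct-key pairs is the sort by the first component
theorem pvSorted2Fst (xs : List (String × Int)) (hn : (xs.map (·.1)).Nodup) :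
    PySem.List.sorted2 xs (fun p => p.1) (fun p => p.2) = PySem.List.sorted xs (fun p => p.1) := by
  rw [PySem.List.sorted_eq_foldl_insertBy]
  show xs.foldl (fun acc x => PySem.List.insertBy _ x acc) [] = _
  apply pvFoldlInsertByCongr _ _ xs [] xs (by simp) (fun z hz => hz)
  intro z hz c hc
  by_cases he : z.1 = c.1
  · have : z = c := List.inj_on_of_nodup_map hn hz hc he
    subst this
    simp
  · rcases lt_or_gt_of_ne he with hlt | hgt
    · simp [hlt]
    · simp [hgt, not_lt_of_gt hgt]

theorem classified_suburbs_eq (dogs : List (String × String × String × String × String)) :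
    classified_suburbs dogs = classified_suburbs_alt dogs := by
  simp only [classified_suburbs, classified_suburbs_alt]
  set rows := (PySem.Dict.ofList dogs).values with hrows
  set acc := rows.foldl pvStepA PySem.Dict.empty with hacc
  have hff : (fun s => (s, ((rows.filter (fun r => r.1 == s && r.2.2.1 != "Not Applicable")).length : Int)))
      = (fun k => (k, (rows.countP (pvCls k) : Int))) := by
    funext k
    simp only [List.countP_eq_length_filter]
    exact rfl
  have hkeys : acc.keys = PySem.Set.ofList (rows.map (·.1)) := by
    rw [hacc, pvKeysA]
    rw [PySem.Set.ofList_eq_foldl]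
    simp [PySem.Set.update]
  have hnd : acc.keys.Nodup := pvNodupA _ _ (by simp)
  have hitems : acc.items = (PySem.Set.ofList (rows.map (·.1))).map
      (fun k => (k, (rows.countP (pvCls k) : Int))) := by
    rw [PySem.Dict.items_eq_map_keys acc hnd 0, hkeys]
    apply List.map_congr_left
    intro k _
    rw [hacc, pvGetDA]
    simp
  have hmfst : acc.items.map (·.1) = acc.keys := rfl
  have hndi : (acc.items.map (·.1)).Nodup := by rw [hmfst]; exact hnd
  rw [pvSorted2Fst _ hndi, hff, List.map_id']
  apply PySem.List.sorted_eq_of_perm_of_pairwise_lt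
  · rw [hitems]
    exact List.Perm.map _ (PySem.List.sorted_perm _ _ _)
  · have hp := PySem.List.sorted_ofList_pairwise_lt (rows.map (·.1))
    exact List.Pairwise.map _ (fun {a b} hab => hab) hp

-- ===== VERDICT (by name: the statement is the Claim_ definition above) =====
theorem classified_suburbs_spec : Claim_equal_classified_suburbs := by
  intro dogs _
  unfold Spec_classified_suburbs
  exact classified_suburbs_eq dogs
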